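-- pv_equiv track=rewrite | github.com/mdowell12/advent-of-code-2024 | solutions/7/run.py | _can_evaluate
-- ===== SOURCE A (Python) =====
-- from itertools import product
--
-- def _can_evaluate(test_value, rights):
--     combos = [i for i in product(['+', '*'], repeat=len(rights)-1)]
--     for combo in combos:
--         result = rights[0]
--         for i in range(len(rights)-1):
--             if combo[i] == '*':
--                 result *= rights[i+1]
--             elif combo[i] == '+':
--                 result += rights[i+1]
--             else:
--                 raise Exception(combo)
--         if result == test_value:
--             return True
--     return False
-- ===== SOURCE B (Python) =====
-- def _can_evaluate(test_value, rights):
--     # Backtrack from the target over the suffix of operands, pruning: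
--     # a '*' on the last operand is only possible when it divides the target.
--     def can(target, k):
--         if k == 0:
--             return target == rights[0]
--         last = rights[k]
--         if last == 0:
--             if target == 0:
--                 return True
--         elif target % last == 0 and can(target // last, k - 1):
--             return True
--         return can(target - last, k - 1)
--     return can(test_value, len(rights) - 1)
-- ===== Notes on version B (the rewrite author's own statement) =====
-- stated objective: faster
-- what changed: A enumerates all 2^(n-1) operator tuples and evaluates each left-to-right; B backtracks from the target over the operands right-to-left, taking the '*' branch only when the last operand divides the current target, which prunes most of the tree.
import Mathlib
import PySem

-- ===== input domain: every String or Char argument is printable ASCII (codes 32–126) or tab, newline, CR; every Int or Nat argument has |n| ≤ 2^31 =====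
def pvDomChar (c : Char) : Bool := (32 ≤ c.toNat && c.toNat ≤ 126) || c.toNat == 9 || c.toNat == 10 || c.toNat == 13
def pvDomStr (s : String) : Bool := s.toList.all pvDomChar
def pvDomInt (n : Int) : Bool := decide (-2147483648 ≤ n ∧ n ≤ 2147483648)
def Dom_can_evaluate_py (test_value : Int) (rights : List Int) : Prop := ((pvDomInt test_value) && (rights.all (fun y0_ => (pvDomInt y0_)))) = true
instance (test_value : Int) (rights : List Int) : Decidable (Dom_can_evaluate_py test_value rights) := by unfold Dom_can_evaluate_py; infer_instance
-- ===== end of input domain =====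

-- B replaces A's exhaustive enumeration of all operator tuples by a right-to-left
-- backtracking search from the target that takes the '*' branch only when the last
-- operand divides the current target (faster by pruning; same results).


-- ===== PORT A =====
-- product(['+','*'], repeat=n): all length-n tuples, first coordinate varying slowest
def pyProd2 : Nat → List (List String)
  | 0 => [[]]
  | n + 1 => ["+", "*"].flatMap (fun o => (pyProd2 n).map (fun l => o :: l))

def can_evaluate_py (test_value : Int) (rights : List Int) : Bool :=
  match rights with
  | [] => false  -- A raises ValueError here (product repeat=-1); outside Pre_
  | r0 :: rest =>
    -- for combo in combos: result = rights[0]; inner index loop = fold over combo zipped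
    -- with the remaining operands; early 'return True' = List.any.  The inner 'else raise'
    -- branch is unreachable (combos contain only '+'/'*'); ported as the identity step.
    (pyProd2 rest.length).any (fun combo =>
      ((combo.zip rest).foldl
        (fun r p => if p.1 == "*" then r * p.2 else if p.1 == "+" then r + p.2 else r)
        r0) == test_value)

-- ===== PORT B =====
-- can(target, k) of Source B; the k-indexed downward recursion is recursion on the
-- reversed operand tail (rights[0] is the base case).
def altGo (r0 : Int) : List Int → Int → Bool
  | [], target => target == r0
  | last :: pre, target =>
    if last == 0 then
      (if target == 0 then true else altGo r0 pre (target - last))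
    else if PySem.Int.mod target last == 0 && altGo r0 pre (PySem.Int.floordiv target last) then
      true
    else altGo r0 pre (target - last)

def can_evaluate_py_alt (test_value : Int) (rights : List Int) : Bool :=
  match rights with
  | [] => false  -- Source B raises IndexError here; outside Pre_
  | r0 :: rest => altGo r0 rest.reverse test_value

-- ===== PRECONDITION & SPEC =====
-- Pre_ excludes only the empty operand list, on which A raises ValueError
-- (itertools.product with repeat=-1).
def Pre_can_evaluate_py (test_value : Int) (rights : List Int) : Prop := rights ≠ []
instance (test_value : Int) (rights : List Int) : Decidable (Pre_can_evaluate_py test_value rights) := by unfold Pre_can_evaluate_py; infer_instance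

def pvWitness_can_evaluate_py : Int × List Int := (10, [2, 5])

def Spec_can_evaluate_py (test_value : Int) (rights : List Int) (out : Bool) : Prop := out = can_evaluate_py_alt test_value rights
instance (test_value : Int) (rights : List Int) (out : Bool) : Decidable (Spec_can_evaluate_py test_value rights out) := by unfold Spec_can_evaluate_py; infer_instance

-- ===== CLAIM (what is proved, stated in full; the proofs are below) =====
def Claim_equal_can_evaluate_py : Prop := ∀ (test_value : Int) (rights : List Int), Dom_can_evaluate_py test_value rights → Pre_can_evaluate_py test_value rights → Spec_can_evaluate_py test_value rights (can_evaluate_py test_value rights)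

-- ===== LEMMAS AND PROOFS =====

-- the set of values reachable by evaluating left-to-right with '+'/'*' choices
def ReachF (acc : Int) : List Int → Int → Prop
  | [] => fun tv => tv = acc
  | x :: rest => fun tv => ReachF (acc * x) rest tv ∨ ReachF (acc + x) rest tv

theorem reachF_nonempty (l : List Int) (acc : Int) : ∃ v, ReachF acc l v := by
  induction l generalizing acc with
  | nil => exact ⟨acc, rfl⟩
  | cons x rest ih =>
    obtain ⟨v, hv⟩ := ih (acc * x)
    exact ⟨v, Or.inl hv⟩

theorem reachF_snoc (l : List Int) (acc x tv : Int) :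
    ReachF acc (l ++ [x]) tv ↔ ∃ v, ReachF acc l v ∧ (tv = v * x ∨ tv = v + x) := by
  induction l generalizing acc with
  | nil => simp only [List.nil_append, ReachF]; constructor
           · rintro (h | h)
             · exact ⟨acc, rfl, Or.inl h⟩
             · exact ⟨acc, rfl, Or.inr h⟩
           · rintro ⟨v, rfl, h | h⟩
             · exact Or.inl h
             · exact Or.inr h
  | cons y rest ih =>
    simp only [List.cons_append, ReachF, ih]
    constructor
    · rintro (⟨v, hv, h⟩ | ⟨v, hv, h⟩)
      · exact ⟨v, Or.inl hv, h⟩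
      · exact ⟨v, Or.inr hv, h⟩
    · rintro ⟨v, hv | hv, h⟩
      · exact Or.inl ⟨v, hv, h⟩
      · exact Or.inr ⟨v, hv, h⟩

theorem mul_eq_iff_mod_div (x tv v : Int) (hx : x ≠ 0) :
    tv = v * x ↔ (PySem.Int.mod tv x = 0 ∧ v = PySem.Int.floordiv tv x) := by
  constructor
  · rintro rfl
    have hm : PySem.Int.mod (v * x) x = 0 :=
      (PySem.Int.mod_eq_zero_iff_dvd _ _).mpr (dvd_mul_left x v)
    have h := PySem.Int.floordiv_mul_add_mod (v * x) x
    rw [hm, add_zero] at h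
    have hz : (PySem.Int.floordiv (v * x) x - v) * x = 0 := by
      rw [sub_mul, h, sub_self]
    rcases mul_eq_zero.mp hz with h0 | h0
    · exact ⟨hm, by omega⟩
    · exact absurd h0 hx
  · rintro ⟨hm, rfl⟩
    have h := PySem.Int.floordiv_mul_add_mod tv x
    rw [hm, add_zero] at h
    omega

theorem altGo_iff (rev : List Int) (r0 tv : Int) :
    altGo r0 rev tv = true ↔ ReachF r0 rev.reverse tv := by
  induction rev generalizing tv with
  | nil => simp [altGo, ReachF]
  | cons last pre ih =>
    simp only [List.reverse_cons, reachF_snoc, altGo]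
    by_cases h0 : last = 0
    · subst h0
      rw [if_pos (by simp)]
      by_cases ht : tv = 0
      · subst ht
        rw [if_pos (by simp)]
        simp only [true_iff]
        obtain ⟨v, hv⟩ := reachF_nonempty pre.reverse r0
        exact ⟨v, hv, Or.inl (by ring)⟩
      · rw [if_neg (by simpa using ht)]
        rw [show tv - 0 = tv by ring, ih]
        constructor
        · intro h; exact ⟨tv, h, Or.inr (by ring)⟩
        · rintro ⟨v, hv, h | h⟩
          · exact absurd h (by simpa using ht)
          · have : v = tv := by omega
            rwa [this] at hv
    · rw [if_neg (by simpa using h0)]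
      constructor
      · intro h
        by_cases hc : (PySem.Int.mod tv last == 0 && altGo r0 pre (PySem.Int.floordiv tv last)) = true
        · simp only [Bool.and_eq_true, beq_iff_eq] at hc
          exact ⟨PySem.Int.floordiv tv last, (ih _).mp hc.2,
            Or.inl ((mul_eq_iff_mod_div last tv _ h0).mpr ⟨hc.1, rfl⟩)⟩
        · rw [if_neg hc] at h
          exact ⟨tv - last, (ih _).mp h, Or.inr (by ring)⟩
      · rintro ⟨v, hv, h | h⟩
        · obtain ⟨hm, hq⟩ := (mul_eq_iff_mod_div last tv v h0).mp h
          have hc : (PySem.Int.mod tv last == 0 && altGo r0 pre (PySem.Int.floordiv tv last)) = true := by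
            simp only [Bool.and_eq_true, beq_iff_eq]
            exact ⟨hm, (ih _).mpr (hq ▸ hv)⟩
          rw [if_pos hc]
        · have heq : tv - last = v := by omega
          have hv' : altGo r0 pre (tv - last) = true := (ih _).mpr (heq ▸ hv)
          split_ifs with hc
          · rfl
          · exact hv'

theorem a_exists_iff (rest : List Int) (r0 tv : Int) :
    (∃ combo ∈ pyProd2 rest.length,
      (((combo.zip rest).foldl
        (fun r p => if p.1 == "*" then r * p.2 else if p.1 == "+" then r + p.2 else r)
        r0) == tv) = true) ↔ ReachF r0 rest tv := by
  induction rest generalizing r0 with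
  | nil =>
    simp only [List.length_nil, pyProd2, List.mem_singleton, ReachF]
    constructor
    · rintro ⟨combo, rfl, h⟩
      simp only [List.zip_nil_right, List.foldl_nil, beq_iff_eq] at h
      exact h.symm
    · intro h
      refine ⟨[], rfl, ?_⟩
      simp only [List.zip_nil_right, List.foldl_nil, beq_iff_eq]
      exact h.symm
  | cons x rest ih =>
    simp only [List.length_cons, pyProd2, List.mem_flatMap, List.mem_map, ReachF, ← ih]
    constructor
    · rintro ⟨combo, ⟨o, ho, l, hl, rfl⟩, hfold⟩
      simp only [List.mem_cons, List.not_mem_nil, or_false] at ho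
      rcases ho with rfl | rfl
      · exact Or.inr ⟨l, hl, by simpa using hfold⟩
      · exact Or.inl ⟨l, hl, by simpa using hfold⟩
    · rintro (⟨l, hl, hfold⟩ | ⟨l, hl, hfold⟩)
      · exact ⟨"*" :: l, ⟨"*", by simp, l, hl, rfl⟩, by simpa using hfold⟩
      · exact ⟨"+" :: l, ⟨"+", by simp, l, hl, rfl⟩, by simpa using hfold⟩

theorem bool_eq_of_iff (a b : Bool) (h : a = true ↔ b = true) : a = b := by
  cases a <;> cases b <;> simp_all

-- ===== VERDICT (by name: the statement is the Claim_ definition above) =====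
theorem can_evaluate_py_spec : Claim_equal_can_evaluate_py := by
  intro tv rights _ hpre
  unfold Spec_can_evaluate_py
  match rights with
  | [] => exact absurd rfl hpre
  | r0 :: rest =>
    simp only [can_evaluate_py, can_evaluate_py_alt]
    refine bool_eq_of_iff _ _ ?_
    rw [List.any_eq_true]
    have hb : (altGo r0 rest.reverse tv = true) ↔ ReachF r0 rest tv := by
      simpa using altGo_iff rest.reverse r0 tv
    exact (a_exists_iff rest r0 tv).trans hb.symm
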